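-- pv_equiv track=rewrite | github.com/Clemspace/Candide | ramanujan/foundation/math_core.py | _sieve_primes_1_mod_4
-- ===== SOURCE A (Python) =====
-- import math
-- from typing import Dict, List, Tuple, Optional
--
-- def _sieve_primes_1_mod_4(limit: int) -> List[int]:
--     """Find primes p ≡ 1 (mod 4)"""
--     if limit < 5:
--         return []
--
--     is_prime = [True] * (limit + 1)
--     is_prime[0] = is_prime[1] = False
--
--     for i in range(2, int(math.sqrt(limit)) + 1):
--         if is_prime[i]:
--             for j in range(i*i, limit + 1, i):
--                 is_prime[j] = False
--
--     return [p for p in range(5, limit + 1) if is_prime[p] and p % 4 == 1]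
-- ===== SOURCE B (Python) =====
-- import math
--
-- def _sieve_primes_1_mod_4(limit: int):
--     """Find primes p ≡ 1 (mod 4) by direct trial division, no sieve array.
--
--     Candidates are generated directly as range(5, limit+1, 4) (every p ≡ 1 mod 4),
--     and since every candidate is odd, only odd trial divisors are tested."""
--     if limit < 5:
--         return []
--
--     def is_prime(p):  # p is odd here
--         for d in range(3, int(math.sqrt(p)) + 1, 2):
--             if p % d == 0:
--                 return False
--         return True
--
--     return [p for p in range(5, limit + 1, 4) if is_prime(p)]
-- ===== Notes on version B (the rewrite author's own statement) =====
-- stated objective: simpler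
-- what changed: Replaces the boolean Eratosthenes sieve array with direct per-candidate trial division: B walks range(5, limit+1, 4) (every p congruent to 1 mod 4) and tests each candidate by dividing by odd d up to int(sqrt(p)).
import Mathlib
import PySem

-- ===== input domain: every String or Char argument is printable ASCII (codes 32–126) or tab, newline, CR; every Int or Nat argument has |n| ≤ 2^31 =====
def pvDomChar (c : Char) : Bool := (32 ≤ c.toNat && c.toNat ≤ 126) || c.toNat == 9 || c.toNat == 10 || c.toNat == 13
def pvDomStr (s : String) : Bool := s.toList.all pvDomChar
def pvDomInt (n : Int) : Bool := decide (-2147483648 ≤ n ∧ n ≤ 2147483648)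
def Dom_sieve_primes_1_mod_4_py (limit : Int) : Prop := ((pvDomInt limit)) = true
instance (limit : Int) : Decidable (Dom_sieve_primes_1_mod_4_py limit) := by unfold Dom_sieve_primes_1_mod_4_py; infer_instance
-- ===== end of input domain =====

-- B replaces A's boolean Eratosthenes-sieve array with per-number trial division
-- up to int(sqrt(p)); objective: simpler (no array bookkeeping), not faster.

-- ===== PORT A =====
-- `int(math.sqrt(n))` equals `Nat.sqrt n` exactly for 0 ≤ n ≤ 2^31 (doubles are
-- exact there), which Dom_ guarantees; ported as Nat.sqrt on that ground.
-- `p % 4` / `p % d`: ported with PySem.Int.mod (Python's floor mod).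
def sieve_primes_1_mod_4_py (limit : Int) : List Int :=
  if limit < 5 then []
  else
    -- is_prime = [True] * (limit + 1); is_prime[0] = is_prime[1] = False
    let init : List Bool := ((List.replicate (limit + 1).toNat true).set 0 false).set 1 false
    -- for i in range(2, int(math.sqrt(limit)) + 1): if is_prime[i]: for j in range(i*i, limit+1, i): is_prime[j] = False
    -- (indices are always in range here, so `getD _ false` reads exactly is_prime[i])
    let arr : List Bool :=
      (PySem.List.pyRange 2 ((Nat.sqrt limit.toNat : Int) + 1) 1).foldl
        (fun a i =>
          if a.getD i.toNat false then
            (PySem.List.pyRange (i * i) (limit + 1) i).foldl (fun a' j => a'.set j.toNat false) a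
          else a) init
    -- [p for p in range(5, limit + 1) if is_prime[p] and p % 4 == 1]
    (PySem.List.pyRange 5 (limit + 1) 1).filter
      (fun p => arr.getD p.toNat false && PySem.Int.mod p 4 == 1)

-- ===== PORT B =====
-- helper is_prime(p): trial division by odd d, early return False ported as List.all
def pvTrialIsPrime (p : Int) : Bool :=
  (PySem.List.pyRange 3 ((Nat.sqrt p.toNat : Int) + 1) 2).all
    (fun d => !(PySem.Int.mod p d == 0))

def sieve_primes_1_mod_4_py_alt (limit : Int) : List Int :=
  if limit < 5 then []
  else
    (PySem.List.pyRange 5 (limit + 1) 4).filter (fun p => pvTrialIsPrime p)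

-- ===== PRECONDITION & SPEC =====
def Spec_sieve_primes_1_mod_4_py (limit : Int) (out : List Int) : Prop := out = sieve_primes_1_mod_4_py_alt limit
instance (limit : Int) (out : List Int) : Decidable (Spec_sieve_primes_1_mod_4_py limit out) := by unfold Spec_sieve_primes_1_mod_4_py; infer_instance

-- ===== CLAIM (what is proved, stated in full; the proofs are below) =====
def Claim_equal_sieve_primes_1_mod_4_py : Prop := ∀ (limit : Int), Dom_sieve_primes_1_mod_4_py limit → Spec_sieve_primes_1_mod_4_py limit (sieve_primes_1_mod_4_py limit)

-- ===== LEMMAS AND PROOFS =====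

-- the sieve invariant predicate: entry n of the array (n ≤ lim) is true iff
-- n ≥ 2 and no d with 2 ≤ d < bound divides n with d*d ≤ n
def pvGood (lim bound : Nat) (l : List Bool) : Prop :=
  l.length = lim + 1 ∧
    ∀ n : Nat, n ≤ lim →
      l.getD n false = decide (2 ≤ n ∧ ∀ d : Nat, 2 ≤ d → d < bound → d ∣ n → ¬ d * d ≤ n)

theorem pvFoldSet_length (js : List Int) (l : List Bool) :
    (js.foldl (fun a' j => a'.set j.toNat false) l).length = l.length := by
  induction js generalizing l with
  | nil => rfl
  | cons j js ih => simp [List.foldl, ih]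

theorem pvFoldSet_getD (js : List Int) (hjs : ∀ j ∈ js, 0 ≤ j) (l : List Bool) (n : Nat) :
    (js.foldl (fun a' j => a'.set j.toNat false) l).getD n false
      = (!decide ((n : Int) ∈ js) && l.getD n false) := by
  induction js generalizing l with
  | nil => simp
  | cons j js ih =>
    have hj : 0 ≤ j := hjs j (by simp)
    have hrest : ∀ x ∈ js, 0 ≤ x := fun x hx => hjs x (by simp [hx])
    simp only [List.foldl_cons]
    rw [ih hrest]
    by_cases hnj : (n : Int) = j
    · have hn : j.toNat = n := by omega
      have hsetf : (l.set j.toNat false).getD n false = false := by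
        by_cases hlen : n < l.length
        · simp [List.getD_eq_getElem?_getD, hn, hlen]
        · rw [List.getD_eq_getElem?_getD, List.getElem?_eq_none (by simp; omega)]
          rfl
      rw [List.getD_eq_getElem?_getD] at hsetf
      simp [List.mem_cons, hnj, hsetf]
    · have hne : j.toNat ≠ n := by omega
      simp only [List.mem_cons, hnj, false_or]
      congr 1
      simp [List.getD_eq_getElem?_getD, hne]

-- membership in the inner marking range, in Nat terms
theorem pvMemInner (k n lim : Nat) (hk : 2 ≤ k) :
    ((n : Int) ∈ PySem.List.pyRange ((k : Int) * k) ((lim : Int) + 1) k)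
      ↔ (k * k ≤ n ∧ n ≤ lim ∧ k ∣ n) := by
  rw [PySem.List.mem_pyRange_iff_of_pos (by exact_mod_cast Nat.lt_of_lt_of_le two_pos hk)]
  constructor
  · rintro ⟨h1, h2, h3⟩
    have hdvd : (k : Int) ∣ (n : Int) := by
      have h4 : (k : Int) ∣ ((n : Int) - (k : Int) * k) + (k : Int) * k :=
        dvd_add h3 (Dvd.intro k rfl)
      simpa using h4
    refine ⟨by exact_mod_cast h1, by omega, by exact_mod_cast hdvd⟩
  · rintro ⟨h1, h2, h3⟩
    refine ⟨by exact_mod_cast h1, by omega, ?_⟩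
    exact dvd_sub (by exact_mod_cast h3) (Dvd.intro k rfl)

-- the initial array: true exactly at indices 2..lim
theorem pvInit (lim : Nat) (h5 : 5 ≤ lim) :
    pvGood lim 2 (((List.replicate (lim + 1) true).set 0 false).set 1 false) := by
  refine ⟨by simp, ?_⟩
  intro n hn
  have hiff : (∀ d : Nat, 2 ≤ d → d < 2 → d ∣ n → ¬ d * d ≤ n) := by omega
  match n with
  | 0 => simp
  | 1 => simp [List.getD_eq_getElem?_getD, (by omega : 0 < lim)]
  | (n + 2) =>
    simp only [List.getD_eq_getElem?_getD, List.getElem?_set, List.getElem?_replicate]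
    simp [(by omega : n + 2 < lim + 1)]
    intro d h1 h2
    omega

-- one outer-loop step preserves the invariant, advancing the bound
theorem pvStep (lim k : Nat) (hk2 : 2 ≤ k) (hklim : k ≤ lim) (l : List Bool)
    (hg : pvGood lim k l) :
    pvGood lim (k + 1)
      (if l.getD (k : Int).toNat false then
          (PySem.List.pyRange ((k : Int) * (k : Int)) ((lim : Int) + 1) (k : Int)).foldl
            (fun a' j => a'.set j.toNat false) l
        else l) := by
  obtain ⟨hlen, hinv⟩ := hg
  have hktoNat : ((k : Int)).toNat = k := by omega
  rw [hktoNat]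
  by_cases hb : l.getD k false
  · rw [if_pos hb]
    have hkprop : 2 ≤ k ∧ ∀ d : Nat, 2 ≤ d → d < k → d ∣ k → ¬ d * d ≤ k := by
      have := hinv k hklim
      rw [hb] at this
      exact of_decide_eq_true this.symm
    refine ⟨by rw [pvFoldSet_length, hlen], ?_⟩
    intro n hn
    have hjs : ∀ j ∈ PySem.List.pyRange ((k : Int) * (k : Int)) ((lim : Int) + 1) (k : Int), 0 ≤ j := by
      intro j hj
      rw [PySem.List.mem_pyRange_iff_of_pos (by exact_mod_cast Nat.lt_of_lt_of_le two_pos hk2)] at hj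
      have : (0 : Int) ≤ (k : Int) * (k : Int) := by positivity
      omega
    rw [pvFoldSet_getD _ hjs, hinv n hn]
    rw [Bool.eq_iff_iff]
    simp only [Bool.and_eq_true, Bool.not_eq_eq_eq_not, Bool.not_true, decide_eq_false_iff_not,
      decide_eq_true_eq]
    rw [pvMemInner k n lim hk2]
    constructor
    · rintro ⟨hnot, h2n, hall⟩
      refine ⟨h2n, fun d hd2 hdk hdn hdd => ?_⟩
      rcases Nat.lt_succ_iff_lt_or_eq.mp hdk with h | rfl
      · exact hall d hd2 h hdn hdd
      · exact hnot ⟨hdd, hn, hdn⟩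
    · rintro ⟨h2n, hall⟩
      refine ⟨?_, h2n, fun d hd2 hdk hdn => hall d hd2 (by omega) hdn⟩
      rintro ⟨hkk, -, hkn⟩
      exact hall k hk2 (by omega) hkn hkk
  · rw [if_neg hb]
    have hkcomp : ∃ d : Nat, 2 ≤ d ∧ d < k ∧ d ∣ k ∧ d * d ≤ k := by
      have hfalse : l.getD k false = false := by simpa using hb
      rw [hinv k hklim] at hfalse
      have h2 : ¬ (2 ≤ k ∧ ∀ d : Nat, 2 ≤ d → d < k → d ∣ k → ¬ d * d ≤ k) :=
        of_decide_eq_false hfalse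
      push Not at h2
      exact h2 hk2
    refine ⟨hlen, ?_⟩
    intro n hn
    rw [hinv n hn, decide_eq_decide]
    obtain ⟨d0, hd0a, hd0b, hd0c, hd0d⟩ := hkcomp
    constructor
    · rintro ⟨h2n, hall⟩
      refine ⟨h2n, fun d hd2 hdk hdn hdd => ?_⟩
      rcases Nat.lt_succ_iff_lt_or_eq.mp hdk with h | rfl
      · exact hall d hd2 h hdn hdd
      · exact hall d0 hd0a hd0b (hd0c.trans hdn) (by nlinarith)
    · rintro ⟨h2n, hall⟩
      exact ⟨h2n, fun d hd2 hdk => hall d hd2 (by omega)⟩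

-- folding the whole remaining outer range brings the bound to m + 1
theorem pvOuter (lim m : Nat) (hmlim : m ≤ lim) :
    ∀ (c k : Nat) (l : List Bool), m + 1 - k ≤ c → 2 ≤ k → k ≤ m + 1 → pvGood lim k l →
      pvGood lim (m + 1)
        ((PySem.List.pyRange (k : Int) ((m : Int) + 1) 1).foldl
          (fun a (i : Int) => if a.getD i.toNat false then
              (PySem.List.pyRange (i * i) ((lim : Int) + 1) i).foldl
                (fun a' j => a'.set j.toNat false) a
            else a) l) := by
  intro c
  induction c with
  | zero =>
    intro k l hc hk2 hkm hg
    have hkeq : k = m + 1 := by omega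
    subst hkeq
    rw [PySem.List.pyRange_one_eq_nil (by push_cast; omega)]
    exact hg
  | succ c ih =>
    intro k l hc hk2 hkm hg
    rcases Nat.lt_or_ge k (m + 1) with hlt | hge
    · rw [PySem.List.pyRange_one_cons (by exact_mod_cast (by omega : (k : Int) < (m : Int) + 1))]
      rw [List.foldl_cons]
      have hstep := pvStep lim k hk2 (by omega) l hg
      have hcast : ((k : Int)) + 1 = ((k + 1 : Nat) : Int) := by push_cast; ring
      rw [hcast]
      exact ih (k + 1) _ (by omega) (by omega) (by omega) hstep
    · have hkeq : k = m + 1 := by omega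
      subst hkeq
      rw [PySem.List.pyRange_one_eq_nil (by push_cast; omega)]
      exact hg

-- the sieve predicate at bound sqrt(lim)+1 is exactly primality (for n ≤ lim)
theorem pvSievePred (lim n : Nat) (h2 : 2 ≤ n) (hn : n ≤ lim) :
    (∀ d : Nat, 2 ≤ d → d < Nat.sqrt lim + 1 → d ∣ n → ¬ d * d ≤ n) ↔ Nat.Prime n := by
  constructor
  · intro hall
    by_contra hnp
    have hmf := Nat.minFac_sq_le_self (by omega) hnp
    have hmfp := Nat.minFac_prime (by omega : n ≠ 1)
    have h2d : 2 ≤ n.minFac := hmfp.two_le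
    have hdd : n.minFac * n.minFac ≤ n := by nlinarith [sq_nonneg n.minFac, hmf, sq (n.minFac)]
    have hle : n.minFac ≤ Nat.sqrt lim :=
      le_trans (Nat.le_sqrt.mpr hdd) (Nat.sqrt_le_sqrt hn)
    exact hall n.minFac h2d (by omega) (Nat.minFac_dvd n) hdd
  · intro hp d hd2 hdm hdn hdd
    rcases (Nat.Prime.eq_one_or_self_of_dvd hp d hdn) with h1 | hself
    · omega
    · subst hself
      nlinarith

-- B's trial division by odd divisors decides primality for odd p ≥ 5
theorem pvTrialIsPrime_eq (p : Nat) (h5 : 5 ≤ p) (hodd : p % 2 = 1) :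
    pvTrialIsPrime (p : Int) = decide (Nat.Prime p) := by
  unfold pvTrialIsPrime
  have htn : ((p : Int)).toNat = p := by omega
  rw [htn]
  rcases Bool.eq_false_or_eq_true (decide (Nat.Prime p)) with hp | hnp
  swap
  · rw [hnp]
    have hnp' : ¬ Nat.Prime p := of_decide_eq_false hnp
    rw [List.all_eq_false]
    have hmf := Nat.minFac_sq_le_self (by omega) hnp'
    have hmfp := Nat.minFac_prime (by omega : p ≠ 1)
    have hdd : p.minFac * p.minFac ≤ p := by nlinarith [hmf]
    have hq2 : 2 ≤ p.minFac := hmfp.two_le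
    have hqodd : p.minFac % 2 = 1 := by
      rcases Nat.even_or_odd p.minFac with he | ho
      · exfalso
        obtain ⟨t, ht⟩ := he
        have h2d : 2 ∣ p := dvd_trans ⟨t, by omega⟩ p.minFac_dvd
        omega
      · obtain ⟨t, ht⟩ := ho
        omega
    refine ⟨(p.minFac : Int), ?_, ?_⟩
    · rw [PySem.List.mem_pyRange_iff_of_pos (by norm_num)]
      have hsq := Nat.le_sqrt.mpr hdd
      refine ⟨by exact_mod_cast (by omega : 3 ≤ p.minFac), by omega, ?_⟩
      have : (2 : Int) ∣ ((p.minFac : Int) - 3) := by omega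
      exact this
    · rw [Bool.not_eq_true, Bool.not_eq_false', beq_iff_eq, PySem.Int.mod_eq_zero_iff_dvd]
      exact_mod_cast p.minFac_dvd
  · rw [hp]
    have hp' : Nat.Prime p := of_decide_eq_true hp
    rw [List.all_eq_true]
    intro d hd
    rw [PySem.List.mem_pyRange_iff_of_pos (by norm_num)] at hd
    rw [Bool.not_eq_true', beq_eq_false_iff_ne]
    intro hmod
    have hdvd : d ∣ (p : Int) := (PySem.Int.mod_eq_zero_iff_dvd _ _).mp hmod
    obtain ⟨dn, rfl⟩ : ∃ dn : Nat, d = (dn : Int) := ⟨d.toNat, by omega⟩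
    have hdvd' : dn ∣ p := by exact_mod_cast hdvd
    exact (Nat.prime_def_le_sqrt.mp hp').2 dn (by exact_mod_cast (by omega : (2 : Int) ≤ (dn : Int))) (by
      have := hd.2.1; push_cast at this; omega) hdvd'

-- a positive-step Python range is strictly increasing
theorem pvPairwise_pyRange (a b s : Int) (hs : 0 < s) :
    (PySem.List.pyRange a b s).Pairwise (· < ·) := by
  rw [PySem.List.pyRange_of_pos a b hs]
  rw [List.pairwise_map]
  refine List.pairwise_lt_range.imp ?_
  intro k k' hk
  have : (s : Int) * k < s * k' := by
    have : ((k : Int)) < ((k' : Int)) := by exact_mod_cast hk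
    exact mul_lt_mul_of_pos_left this hs
  omega

-- filtering a step-1 range by `p % 4 == 1` is the same as walking the range in steps of 4
theorem pvFilter4 (b : Int) (f : Int → Bool) :
    (PySem.List.pyRange 5 b 1).filter (fun p => f p && PySem.Int.mod p 4 == 1)
      = (PySem.List.pyRange 5 b 4).filter f := by
  have hp1 : ((PySem.List.pyRange 5 b 1).filter
      (fun p => f p && PySem.Int.mod p 4 == 1)).Pairwise (· < ·) :=
    (pvPairwise_pyRange 5 b 1 (by norm_num)).filter _
  have hp4 : ((PySem.List.pyRange 5 b 4).filter f).Pairwise (· < ·) :=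
    (pvPairwise_pyRange 5 b 4 (by norm_num)).filter _
  have hmem : ∀ x : Int,
      x ∈ (PySem.List.pyRange 5 b 1).filter (fun p => f p && PySem.Int.mod p 4 == 1)
        ↔ x ∈ (PySem.List.pyRange 5 b 4).filter f := by
    intro x
    simp only [List.mem_filter, Bool.and_eq_true, beq_iff_eq, PySem.List.mem_pyRange_one,
      PySem.List.mem_pyRange_iff_of_pos (by norm_num : (0 : Int) < 4)]
    rw [PySem.Int.mod_eq_emod_of_pos (by norm_num)]
    constructor
    · rintro ⟨⟨h1, h2⟩, hf, hm⟩
      exact ⟨⟨h1, h2, by omega⟩, hf⟩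
    · rintro ⟨⟨h1, h2, h3⟩, hf⟩
      exact ⟨⟨h1, h2⟩, hf, by omega⟩
  exact List.eq_of_perm_of_sorted (fun x y _ _ h h' => by omega) hp1 hp4
    ((List.perm_ext_iff_of_nodup (hp1.imp ne_of_lt) (hp4.imp ne_of_lt)).mpr hmem)

-- ===== VERDICT (by name: the statement is the Claim_ definition above) =====
theorem sieve_primes_1_mod_4_py_spec : Claim_equal_sieve_primes_1_mod_4_py := by
  intro limit _
  unfold Spec_sieve_primes_1_mod_4_py sieve_primes_1_mod_4_py sieve_primes_1_mod_4_py_alt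
  by_cases h5 : limit < 5
  · simp [h5]
  · rw [if_neg h5, if_neg h5]
    obtain ⟨lim, rfl⟩ : ∃ lim : Nat, limit = (lim : Int) := ⟨limit.toNat, by omega⟩
    have hlim5 : 5 ≤ lim := by omega
    have htn1 : ((lim : Int) + 1).toNat = lim + 1 := by omega
    rw [htn1]
    have hgood := pvOuter lim (Nat.sqrt lim) (Nat.sqrt_le_self lim)
      (Nat.sqrt lim + 1) 2
      (((List.replicate (lim + 1) true).set 0 false).set 1 false)
      (Nat.sub_le _ _) le_rfl
      (by have h4 : 2 ≤ Nat.sqrt lim := Nat.le_sqrt.mpr (by omega); omega)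
      (pvInit lim hlim5)
    obtain ⟨-, hinv⟩ := hgood
    simp only [Nat.cast_ofNat] at hinv
    have hA : ∀ p ∈ PySem.List.pyRange 5 ((lim : Int) + 1) 1,
        ((List.foldl
            (fun a (i : Int) =>
              if a.getD i.toNat false then
                List.foldl (fun a' j => a'.set j.toNat false) a
                  (PySem.List.pyRange (i * i) ((lim : Int) + 1) i)
              else a)
            (((List.replicate (lim + 1) true).set 0 false).set 1 false)
            (PySem.List.pyRange (2 : Int) ((Nat.sqrt lim : Int) + 1) 1)).getD p.toNat false
          && (PySem.Int.mod p 4 == 1))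
          = ((decide (Nat.Prime p.toNat)) && (PySem.Int.mod p 4 == 1)) := by
      intro p hp
      rw [PySem.List.mem_pyRange_one] at hp
      congr 1
      obtain ⟨pn, rfl⟩ : ∃ pn : Nat, p = (pn : Int) := ⟨p.toNat, by omega⟩
      obtain ⟨hp1, hp2⟩ := hp
      have := hinv pn (by omega)
      simp only [Int.toNat_natCast]
      rw [this, decide_eq_decide]
      constructor
      · rintro ⟨-, hall⟩
        exact (pvSievePred lim pn (by omega) (by omega)).mp hall
      · intro hprime
        exact ⟨by omega, (pvSievePred lim pn (by omega) (by omega)).mpr hprime⟩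
    have hB : ∀ p ∈ PySem.List.pyRange 5 ((lim : Int) + 1) 4,
        pvTrialIsPrime p = decide (Nat.Prime p.toNat) := by
      intro p hp
      rw [PySem.List.mem_pyRange_iff_of_pos (by norm_num)] at hp
      obtain ⟨pn, rfl⟩ : ∃ pn : Nat, p = (pn : Int) := ⟨p.toNat, by omega⟩
      simp only [Int.toNat_natCast]
      exact pvTrialIsPrime_eq pn (by exact_mod_cast hp.1) (by
        obtain ⟨-, -, h4⟩ := hp; omega)
    simp only [Int.toNat_natCast]
    rw [List.filter_congr hA, List.filter_congr hB]
    exact pvFilter4 ((lim : Int) + 1) _
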